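-- pv_equiv track=rewrite | github.com/liwenhan220/alphagomoku-experimental- | testnet.py | evaluate_pattern
-- ===== SOURCE A (Python) =====
-- SCORES = {
--     'open_four': 1000,  # 两头空的四子
--     'double_three': 800,  # 双三
--     'open_three': 300,  # 两头空的三子
--     'closed_four': 500,  # 单头堵四子
--     'open_two': 100,  # 两头空的二子
--     'closed_three': 200,  # 单头堵三子
--     'closed_two': 50,  # 单头堵二子
--     'other': 0  # 其他
-- }
--
-- def evaluate_pattern(pattern, is_player):
--     """
--     根据5子模式评估分数，找两头空的四、双三等棋型。
--     """
--     if len(pattern) != 5: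
--         return 0
--
--     player_pieces = sum([1 for p in pattern if p == 1])
--     opponent_pieces = sum([1 for p in pattern if p == -1])
--
--     # 判断两头空的四子
--     if player_pieces == 4 and opponent_pieces == 0:
--         return SCORES['open_four']
--
--     # 判断双三
--     if player_pieces == 3 and opponent_pieces == 0:
--         return SCORES['double_three']
--
--     # 判断活三
--     if player_pieces == 3 and opponent_pieces == 1:
--         return SCORES['open_three']
--
--     # 判断单头堵四子
--     if player_pieces == 4 and opponent_pieces == 1:
--         return SCORES['closed_four']
--
--     # 判断两头空的二子
--     if player_pieces == 2 and opponent_pieces == 0: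
--         return SCORES['open_two']
--
--     # 判断单头堵三子
--     if player_pieces == 3 and opponent_pieces == 2:
--         return SCORES['closed_three']
--
--     # 判断单头堵二子
--     if player_pieces == 2 and opponent_pieces == 1:
--         return SCORES['closed_two']
--
--     return SCORES['other']
-- ===== SOURCE B (Python) =====
-- # Flat score array indexed by 6*player_count + opponent_count (counts are <= 5, so index < 36).
-- _FLAT = [0] * 36
-- for _idx, _score in ((24, 1000), (18, 800), (19, 300), (25, 500), (12, 100), (20, 200), (13, 50)):
--     _FLAT[_idx] = _score
--
-- def evaluate_pattern(pattern, is_player):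
--     if len(pattern) != 5:
--         return 0
--     idx = 0
--     for p in pattern:
--         if p == 1:
--             idx += 6
--         elif p == -1:
--             idx += 1
--     return _FLAT[idx]
-- ===== Notes on version B (the rewrite author's own statement) =====
-- stated objective: alternative
-- what changed: A's two comprehension counts followed by a seven-branch if-cascade over a string-keyed dict are replaced by a single pass that accumulates a radix-6 index (player stone adds 6, opponent stone adds 1) and one direct access into a flat 36-entry score array.
import Mathlib
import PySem

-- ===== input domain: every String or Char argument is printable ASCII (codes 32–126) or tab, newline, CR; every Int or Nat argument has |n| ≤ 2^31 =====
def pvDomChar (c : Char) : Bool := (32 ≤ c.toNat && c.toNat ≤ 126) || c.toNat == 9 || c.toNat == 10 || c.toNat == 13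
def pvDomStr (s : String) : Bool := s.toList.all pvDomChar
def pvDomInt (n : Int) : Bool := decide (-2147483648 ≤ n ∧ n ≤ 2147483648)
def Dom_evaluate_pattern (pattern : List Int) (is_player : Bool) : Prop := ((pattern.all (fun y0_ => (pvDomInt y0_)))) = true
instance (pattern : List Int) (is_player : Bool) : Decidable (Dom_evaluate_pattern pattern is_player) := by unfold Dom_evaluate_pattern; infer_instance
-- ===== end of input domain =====

-- B replaces A's two counting passes plus seven-branch cascade by one pass accumulating a
-- radix-6 index and a direct access into a flat 36-entry score array (objective: alternative).

-- ===== PORT A =====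
-- module-level SCORES dict (insertion-order association list)
def SCORES : PySem.Dict String Int := PySem.Dict.ofList
  [("open_four", 1000), ("double_three", 800), ("open_three", 300), ("closed_four", 500),
   ("open_two", 100), ("closed_three", 200), ("closed_two", 50), ("other", 0)]

def evaluate_pattern (pattern : List Int) (is_player : Bool) : Int :=
  if pattern.length ≠ 5 then 0
  else
    let player_pieces := ((pattern.filter (fun p => p == 1)).map (fun _ => (1 : Int))).sum
    let opponent_pieces := ((pattern.filter (fun p => p == -1)).map (fun _ => (1 : Int))).sum
    if player_pieces = 4 ∧ opponent_pieces = 0 then PySem.Dict.getD SCORES "open_four" 0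
    else if player_pieces = 3 ∧ opponent_pieces = 0 then PySem.Dict.getD SCORES "double_three" 0
    else if player_pieces = 3 ∧ opponent_pieces = 1 then PySem.Dict.getD SCORES "open_three" 0
    else if player_pieces = 4 ∧ opponent_pieces = 1 then PySem.Dict.getD SCORES "closed_four" 0
    else if player_pieces = 2 ∧ opponent_pieces = 0 then PySem.Dict.getD SCORES "open_two" 0
    else if player_pieces = 3 ∧ opponent_pieces = 2 then PySem.Dict.getD SCORES "closed_three" 0
    else if player_pieces = 2 ∧ opponent_pieces = 1 then PySem.Dict.getD SCORES "closed_two" 0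
    else PySem.Dict.getD SCORES "other" 0

-- ===== PORT B =====
-- _FLAT = [0]*36, then the seven assignments (pySetD is exact: every index 12..25 is in range)
def pvFlat : List Int :=
  ([((24 : Int), (1000 : Int)), (18, 800), (19, 300), (25, 500), (12, 100), (20, 200), (13, 50)]).foldl
    (fun xs iv => PySem.List.pySetD xs iv.1 iv.2) (List.replicate 36 (0 : Int))

def evaluate_pattern_alt (pattern : List Int) (is_player : Bool) : Int :=
  if pattern.length ≠ 5 then 0
  else
    let idx := pattern.foldl
      (fun acc p => if p == 1 then acc + 6 else if p == (-1 : Int) then acc + 1 else acc) (0 : Int)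
    -- _FLAT[idx]: idx = 6*count(1)+count(-1) ∈ [0, 30] is always in range, so pyGetD is exact here
    PySem.List.pyGetD pvFlat idx 0

-- ===== PRECONDITION & SPEC =====
def Spec_evaluate_pattern (pattern : List Int) (is_player : Bool) (out : Int) : Prop := out = evaluate_pattern_alt pattern is_player
instance (pattern : List Int) (is_player : Bool) (out : Int) : Decidable (Spec_evaluate_pattern pattern is_player out) := by unfold Spec_evaluate_pattern; infer_instance

-- ===== CLAIM (what is proved, stated in full; the proofs are below) =====
def Claim_equal_evaluate_pattern : Prop := ∀ (pattern : List Int) (is_player : Bool), Dom_evaluate_pattern pattern is_player → Spec_evaluate_pattern pattern is_player (evaluate_pattern pattern is_player)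

-- ===== LEMMAS AND PROOFS =====

-- A's comprehension sum equals a cast List.count
lemma sum_filter_eq_count (pattern : List Int) (v : Int) :
    ((pattern.filter (fun p => p == v)).map (fun _ => (1 : Int))).sum = (pattern.count v : Int) := by
  rw [PySem.List.sum_map_const_int]
  simp [List.count_eq_length_filter]

-- B's fold computes 6*count(1) + count(-1)
lemma fold_idx (l : List Int) (z : Int) :
    l.foldl (fun acc p => if p == 1 then acc + 6 else if p == (-1 : Int) then acc + 1 else acc) z
      = z + 6 * (l.count 1 : Int) + (l.count (-1) : Int) := by
  induction l generalizing z with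
  | nil => simp
  | cons x xs ih =>
    simp only [List.foldl_cons, List.count_cons, ih]
    by_cases h1 : x = 1
    · simp [h1]; ring
    · by_cases h2 : x = -1
      · simp [h2]; ring
      · simp [h1, h2]

-- ===== VERDICT (by name: the statement is the Claim_ definition above) =====
theorem evaluate_pattern_spec : Claim_equal_evaluate_pattern := by
  intro pattern is_player _
  unfold Spec_evaluate_pattern evaluate_pattern evaluate_pattern_alt
  by_cases h : pattern.length = 5
  · simp only [h, ne_eq, not_true_eq_false, if_false]
    rw [sum_filter_eq_count, sum_filter_eq_count, fold_idx]
    have ha : pattern.count 1 ≤ 5 := h ▸ List.count_le_length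
    have hb : pattern.count (-1) ≤ 5 := h ▸ List.count_le_length
    set a := pattern.count 1 with hA
    set b := pattern.count (-1) with hB
    clear_value a b
    interval_cases a <;> interval_cases b <;> decide
  · simp [h]
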